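-- pv_equiv track=rewrite | github.com/AaronJai/UniProjects | CITS2200 Data Structures & Algorithms/Labs/Lab 6 (assessed) 24May/trains_planes.py | trains_planes
-- ===== SOURCE A (Python) =====
-- def trains_planes(trains, planes):
--     """Find what flights can be replaced with a rail journey.
--
--     Initially, there are no rail connections between cities. As rail connections
--     become available, we are interested in knowing what flights can be replaced
--     by a rail journey, no matter how indirect the route. All rail connections
--     are bidirectional.
--
--     Target Complexity: O(N lg N) in the size of the input (trains + planes).
--
--     Args:
--         trains: A list of `(date, lcity, rcity)` tuples specifying that a rail
--             connection between `lcity` and `rcity` became available on `date`.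
--         planes: A list of `(code, date, depart, arrive)` tuples specifying that
--             there is a flight scheduled from `depart` to `arrive` on `date` with
--             flight number `code`.
--
--     Returns:
--         A list of flights that could be replaced by a train journey.
--     """
--     class UnionFind:
--         def __init__(self):
--             self.parent = {} # Dict to store parent of each item
--             self.rank = {}  # Dict to store rank of each item (used in union by rank later)
--
--         def find(self, item):
--             # Makes the tree flatter by setting the parent of each node on the path directly to the root.
--             if self.parent[item] != item:
--                 self.parent[item] = self.find(self.parent[item])
--             return self.parent[item]
--
--         def union(self, set1, set2):
--             # Find the roots of the sets in which elements set1 and set2 are.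
--             root1 = self.find(set1)
--             root2 = self.find(set2)
--             # If they are in different sets, union them.
--             if root1 != root2:
--                 # attach the smaller tree under the root of the larger tree.
--                 if self.rank[root1] > self.rank[root2]:
--                     self.parent[root2] = root1
--                 elif self.rank[root1] < self.rank[root2]:
--                     self.parent[root1] = root2
--                 else:
--                     # If ranks are the same, make one root of the other and increase the rank.
--                     self.parent[root2] = root1
--                     self.rank[root1] += 1
--
--         def add(self, item):
--              # Add a new item to the union-find structure if it is not already present.
--             if item not in self.parent:
--                 self.parent[item] = item
--                 self.rank[item] = 0
--
--     uf = UnionFind() # Initialize the union-find instance.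
--
--     # Initialize union-find structure with all cities mentioned in trains
--     for _, lcity, rcity in trains:
--         uf.add(lcity)
--         uf.add(rcity)
--
--     # Sort trains and planes by date
--     trains.sort(key=lambda x: x[0])
--     planes.sort(key=lambda x: x[1])
--
--     # Process train connections
--     train_index = 0 # Index to keep track of which train connection is to be processed next.
--     n_trains = len(trains) # Total number of train connections.
--
--     replacable_flights = [] # List to store flights that can be replaced by train journeys
--     for flight in planes:
--         code, fdate, depart, arrive = flight
--
--         # Process all train connections up to the date of the flight
--         while train_index < n_trains and trains[train_index][0] <= fdate:
--             _, lcity, rcity = trains[train_index]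
--             uf.union(lcity, rcity) # Connect the cities by train in the union-find structure.
--             train_index += 1
--
--         # Check if the flight can be replaced by a train
--         if uf.find(depart) == uf.find(arrive):
--             replacable_flights.append(flight) # If can replace, add the flight to the list of replaceable flights.
--
--     return replacable_flights
-- ===== SOURCE B (Python) =====
-- def trains_planes(trains, planes):
--     """Find what flights can be replaced with a rail journey."""
--     # Component labels maintained directly: comp maps each city to its
--     # component label; members maps each live label to the list of its cities.
--     # Merging relabels the smaller component (small-to-large), so each city is
--     # relabelled at most O(lg N) times.
--     comp = {}
--     members = {}
--     for _, lcity, rcity in trains: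
--         for city in (lcity, rcity):
--             if city not in comp:
--                 comp[city] = city
--                 members[city] = [city]
--
--     trains.sort(key=lambda x: x[0])
--     planes.sort(key=lambda x: x[1])
--
--     train_index = 0
--     n_trains = len(trains)
--     replacable_flights = []
--     for flight in planes:
--         code, fdate, depart, arrive = flight
--         while train_index < n_trains and trains[train_index][0] <= fdate:
--             _, lcity, rcity = trains[train_index]
--             a, b = comp[lcity], comp[rcity]
--             if a != b:
--                 if len(members[a]) < len(members[b]):
--                     a, b = b, a
--                 for city in members[b]:
--                     comp[city] = a
--                 members[a].extend(members[b])
--                 del members[b]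
--             train_index += 1
--         if comp[depart] == comp[arrive]:
--             replacable_flights.append(flight)
--     return replacable_flights
-- ===== Notes on version B (the rewrite author's own statement) =====
-- stated objective: alternative
-- what changed: Union-find with path compression and union-by-rank is replaced by direct component labels: a dict city->label plus a members list per label, merging by relabelling the smaller component (small-to-large), so each connectivity query is two plain dict lookups instead of two recursive find calls.
-- outside the precondition, e.g. on trains_planes([], [('F1', 1, 'x', 'x')]): A raises KeyError, B raises KeyError
import Mathlib
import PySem

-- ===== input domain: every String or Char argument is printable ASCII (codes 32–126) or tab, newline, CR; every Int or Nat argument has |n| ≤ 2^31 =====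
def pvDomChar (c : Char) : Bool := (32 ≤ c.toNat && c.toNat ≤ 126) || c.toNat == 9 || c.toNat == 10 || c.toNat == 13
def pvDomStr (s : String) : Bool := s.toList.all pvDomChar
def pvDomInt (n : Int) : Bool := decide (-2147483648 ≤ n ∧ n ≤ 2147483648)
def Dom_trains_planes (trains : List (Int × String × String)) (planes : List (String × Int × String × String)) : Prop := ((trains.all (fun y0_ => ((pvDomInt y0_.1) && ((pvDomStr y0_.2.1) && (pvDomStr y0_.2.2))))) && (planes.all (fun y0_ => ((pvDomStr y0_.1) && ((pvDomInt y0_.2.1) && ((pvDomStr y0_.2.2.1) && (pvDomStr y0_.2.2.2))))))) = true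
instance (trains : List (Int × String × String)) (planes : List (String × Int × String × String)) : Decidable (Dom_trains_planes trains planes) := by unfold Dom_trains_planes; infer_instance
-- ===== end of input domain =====

-- B replaces A's union-find (path compression + union by rank) by direct component labels
-- (city → label dict, plus a members list per label, merging small-to-large); equivalence is
-- about the RETURN value (both Pythons also sort `trains` and `planes` in place, identically).

-- ===== PORT A =====
-- UnionFind.find with path compression.  `fuel` is a totality guard only: it always
-- exceeds the tree depth at every call site (proved via the invariant `UFInv`);
-- `none` from get? is Python's KeyError, excluded by Pre_.
def ufFind : Nat → PySem.Dict String String → String → String × PySem.Dict String String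
  | 0, parent, item => (item, parent)
  | fuel+1, parent, item =>
    match parent.get? item with
    | none => (item, parent)
    | some p =>
      if p ≠ item then
        let rp := ufFind fuel parent p
        (rp.1, rp.2.insert item rp.1)
      else (p, parent)

-- UnionFind.union (rank read `self.rank[root1]` is total on reachable states: roots are ranked)
def ufUnion (fuel : Nat) (parent : PySem.Dict String String) (rank : PySem.Dict String Int)
    (set1 set2 : String) : PySem.Dict String String × PySem.Dict String Int :=
  let f1 := ufFind fuel parent set1
  let f2 := ufFind fuel f1.2 set2
  if f1.1 ≠ f2.1 then
    if rank.getD f1.1 0 > rank.getD f2.1 0 then (f2.2.insert f2.1 f1.1, rank)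
    else if rank.getD f1.1 0 < rank.getD f2.1 0 then (f2.2.insert f1.1 f2.1, rank)
    else (f2.2.insert f2.1 f1.1, rank.modify f1.1 0 (· + 1))
  else (f2.2, rank)

-- UnionFind.add
def ufAdd (pr : PySem.Dict String String × PySem.Dict String Int) (item : String) :
    PySem.Dict String String × PySem.Dict String Int :=
  if pr.1.contains item then pr else (pr.1.insert item item, pr.2.insert item 0)

-- the inner `while train_index < n_trains and trains[train_index][0] <= fdate` loop,
-- walking the (sorted) remaining trains
def ufAdvance (fuel : Nat) (fdate : Int) :
    List (Int × String × String) → PySem.Dict String String → PySem.Dict String Int →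
    List (Int × String × String) × PySem.Dict String String × PySem.Dict String Int
  | [], parent, rank => ([], parent, rank)
  | t :: ts, parent, rank =>
    if t.1 ≤ fdate then
      let pr := ufUnion fuel parent rank t.2.1 t.2.2
      ufAdvance fuel fdate ts pr.1 pr.2
    else (t :: ts, parent, rank)

-- the `for flight in planes` loop
def ufLoop (fuel : Nat) :
    List (String × Int × String × String) → List (Int × String × String) →
    PySem.Dict String String → PySem.Dict String Int → List (String × Int × String × String)
  | [], _, _, _ => []
  | f :: fs, ts, parent, rank =>
    let a := ufAdvance fuel f.2.1 ts parent rank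
    let fd := ufFind fuel a.2.1 f.2.2.1
    let fa := ufFind fuel fd.2 f.2.2.2
    let rest := ufLoop fuel fs a.1 fa.2 a.2.2
    if fd.1 = fa.1 then f :: rest else rest

def trains_planes (trains : List (Int × String × String)) (planes : List (String × Int × String × String)) : List (String × Int × String × String) :=
  let seeded := trains.foldl (fun pr t => ufAdd (ufAdd pr t.2.1) t.2.2)
    ((PySem.Dict.empty : PySem.Dict String String), (PySem.Dict.empty : PySem.Dict String Int))
  let trainsS := PySem.List.sorted trains (fun x => x.1) false
  let planesS := PySem.List.sorted planes (fun x => x.2.1) false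
  ufLoop (2 ^ trains.length) planesS trainsS seeded.1 seeded.2

-- ===== PORT B =====
-- seed one city: comp[city] = city, members[city] = [city] when absent
def cmSeed (cm : PySem.Dict String String × PySem.Dict String (List String)) (city : String) :
    PySem.Dict String String × PySem.Dict String (List String) :=
  if cm.1.contains city then cm else (cm.1.insert city city, cm.2.insert city [city])

-- merge the components of l and r, relabelling the smaller one
-- (`comp.getD l l`: l and r are always seeded train cities, so the default is never used;
--  Python's comp[x] on an unseeded city is a KeyError, excluded by Pre_)
def cmMerge (comp : PySem.Dict String String) (members : PySem.Dict String (List String))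
    (l r : String) : PySem.Dict String String × PySem.Dict String (List String) :=
  let a := comp.getD l l
  let b := comp.getD r r
  if a ≠ b then
    let ma := members.getD a []
    let mb := members.getD b []
    let s := if ma.length < mb.length then (b, a, mb, ma) else (a, b, ma, mb)
    let comp' := s.2.2.2.foldl (fun c city => c.insert city s.1) comp
    (comp', (members.insert s.1 (s.2.2.1 ++ s.2.2.2)).erase s.2.1)
  else (comp, members)

def cmAdvance (fdate : Int) :
    List (Int × String × String) → PySem.Dict String String → PySem.Dict String (List String) →
    List (Int × String × String) × PySem.Dict String String × PySem.Dict String (List String)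
  | [], comp, members => ([], comp, members)
  | t :: ts, comp, members =>
    if t.1 ≤ fdate then
      let cm := cmMerge comp members t.2.1 t.2.2
      cmAdvance fdate ts cm.1 cm.2
    else (t :: ts, comp, members)

def cmLoop :
    List (String × Int × String × String) → List (Int × String × String) →
    PySem.Dict String String → PySem.Dict String (List String) → List (String × Int × String × String)
  | [], _, _, _ => []
  | f :: fs, ts, comp, members =>
    let a := cmAdvance f.2.1 ts comp members
    let rest := cmLoop fs a.1 a.2.1 a.2.2
    if a.2.1.getD f.2.2.1 f.2.2.1 = a.2.1.getD f.2.2.2 f.2.2.2 then f :: rest else rest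

def trains_planes_alt (trains : List (Int × String × String)) (planes : List (String × Int × String × String)) : List (String × Int × String × String) :=
  let seeded := trains.foldl (fun cm t => cmSeed (cmSeed cm t.2.1) t.2.2)
    ((PySem.Dict.empty : PySem.Dict String String), (PySem.Dict.empty : PySem.Dict String (List String)))
  let trainsS := PySem.List.sorted trains (fun x => x.1) false
  let planesS := PySem.List.sorted planes (fun x => x.2.1) false
  cmLoop planesS trainsS seeded.1 seeded.2

-- ===== PRECONDITION & SPEC =====
-- all cities mentioned in trains
def trainCities (trains : List (Int × String × String)) : List String :=
  trains.flatMap (fun t => [t.2.1, t.2.2])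

-- Pre_ excludes exactly the inputs where A raises KeyError: a flight endpoint that is
-- not a city of any train (B raises the same KeyError there).
def Pre_trains_planes (trains : List (Int × String × String)) (planes : List (String × Int × String × String)) : Prop :=
  ∀ f ∈ planes, f.2.2.1 ∈ trainCities trains ∧ f.2.2.2 ∈ trainCities trains
instance (trains : List (Int × String × String)) (planes : List (String × Int × String × String)) : Decidable (Pre_trains_planes trains planes) := by unfold Pre_trains_planes; infer_instance

def pvWitness_trains_planes : (List (Int × String × String)) × (List (String × Int × String × String)) :=
  ([(1, "a", "b"), (3, "b", "c")], [("F1", 2, "a", "b"), ("F2", 2, "a", "c"), ("F3", 4, "c", "a")])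

def Spec_trains_planes (trains : List (Int × String × String)) (planes : List (String × Int × String × String)) (out : List (String × Int × String × String)) : Prop := out = trains_planes_alt trains planes
instance (trains : List (Int × String × String)) (planes : List (String × Int × String × String)) (out : List (String × Int × String × String)) : Decidable (Spec_trains_planes trains planes out) := by unfold Spec_trains_planes; infer_instance

-- ===== CLAIM (what is proved, stated in full; the proofs are below) =====
def Claim_equal_trains_planes : Prop := ∀ (trains : List (Int × String × String)) (planes : List (String × Int × String × String)), Dom_trains_planes trains planes → Pre_trains_planes trains planes → Spec_trains_planes trains planes (trains_planes trains planes)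

-- ===== LEMMAS AND PROOFS =====

-- Invariant of A's union-find parent dict: ρ abstracts the root of each key, d is a
-- depth measure strictly decreasing along parent links, bounded by B.
def UFInv (parent : PySem.Dict String String) (ρ : String → String) (d : String → Nat) (B : Nat) : Prop :=
  parent.keys.Nodup ∧
  (∀ x ∈ parent.keys, ∃ p, parent.get? x = some p ∧ p ∈ parent.keys ∧ ρ p = ρ x ∧
      (p = x → ρ x = x) ∧ (p ≠ x → d p < d x)) ∧
  (∀ x ∈ parent.keys, ρ x ∈ parent.keys ∧ parent.get? (ρ x) = some (ρ x) ∧ ρ (ρ x) = ρ x) ∧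
  (∀ x ∈ parent.keys, d x ≤ B)

-- B's component label of a city
def cD (comp : PySem.Dict String String) (x : String) : String := comp.getD x x

-- Invariant of B's (comp, members) pair over the key set K
def CMInv (K : List String) (comp : PySem.Dict String String)
    (members : PySem.Dict String (List String)) : Prop :=
  comp.keys = K ∧
  (∀ lab x, x ∈ members.getD lab [] → x ∈ K ∧ cD comp x = lab) ∧
  (∀ x ∈ K, x ∈ members.getD (cD comp x) [])

-- the full correspondence carried around the main loop
def Corr (parent comp : PySem.Dict String String) (members : PySem.Dict String (List String))
    (ρ : String → String) (d : String → Nat) (B : Nat) : Prop :=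
  UFInv parent ρ d B ∧
  CMInv parent.keys comp members ∧
  (∀ x ∈ parent.keys, ∀ y ∈ parent.keys, (cD comp x = cD comp y ↔ ρ x = ρ y))

theorem dict_get?_erase {ν : Type} (d : PySem.Dict String ν) (k k' : String) :
    (d.erase k).get? k' = if k' = k then none else d.get? k' := by
  obtain ⟨items⟩ := d
  induction items with
  | nil => simp [PySem.Dict.erase, PySem.Dict.get?]
  | cons p rest ih =>
    by_cases h1 : p.1 = k <;> by_cases h2 : p.1 = k' <;>
      simp_all [PySem.Dict.erase, PySem.Dict.get?]

theorem ufInv_root_d_lt {parent ρ d B} (h : UFInv parent ρ d B) :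
    ∀ x ∈ parent.keys, ρ x ≠ x → d (ρ x) < d x := by
  obtain ⟨-, h2, -, -⟩ := h
  suffices H : ∀ n x, x ∈ parent.keys → ρ x ≠ x → d x = n → d (ρ x) < d x by
    intro x hx hne; exact H (d x) x hx hne rfl
  intro n
  induction n using Nat.strong_induction_on with
  | _ n ih =>
    intro x hx hne hdx
    obtain ⟨p, hp, hpk, hρ, hroot, hd⟩ := h2 x hx
    by_cases hpx : p = x
    · exact absurd (hroot hpx) hne
    · have hdp := hd hpx
      by_cases hρp : ρ p = p
      · rw [← hρ, hρp]; exact hdp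
      · have := ih (d p) (by omega) p hpk hρp rfl
        rw [← hρ]; omega

theorem ufInv_mono {parent ρ d B B'} (h : UFInv parent ρ d B) (hB : B ≤ B') :
    UFInv parent ρ d B' := by
  obtain ⟨h1, h2, h3, h4⟩ := h
  exact ⟨h1, h2, h3, fun x hx => le_trans (h4 x hx) hB⟩

theorem ufFind_correct {parent ρ d B} (fuel : Nat) (x : String)
    (h : UFInv parent ρ d B) (hx : x ∈ parent.keys) (hf : d x < fuel) :
    (ufFind fuel parent x).1 = ρ x ∧ (ufFind fuel parent x).2.keys = parent.keys ∧
      UFInv (ufFind fuel parent x).2 ρ d B := by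
  induction fuel generalizing parent x with
  | zero => omega
  | succ fuel ih =>
    obtain ⟨p, hp, hpk, hρ, hroot, hd⟩ := h.2.1 x hx
    simp only [ufFind, hp]
    by_cases hpx : p = x
    · have hr := hroot hpx
      subst hpx
      rw [if_neg (fun hc => hc rfl)]
      exact ⟨hr.symm, rfl, h⟩
    · obtain ⟨e1, e2, hq⟩ := ih p h hpk (by have := hd hpx; have := h.2.2.2 x hx; omega)
      simp only [ne_eq, hpx, not_false_eq_true, if_true]
      have e1' : (ufFind fuel parent p).1 = ρ x := e1.trans hρ
      rw [e1']
      have hcx : (ufFind fuel parent p).2.contains x = true :=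
        (PySem.Dict.contains_iff_mem_keys _ _).mpr (e2 ▸ hx)
      have hkeys : ((ufFind fuel parent p).2.insert x (ρ x)).keys = parent.keys := by
        rw [PySem.Dict.keys_insert_of_contains _ _ hcx, e2]
      have hdlt : ρ x ≠ x → d (ρ x) < d x := ufInv_root_d_lt h x hx
      refine ⟨rfl, hkeys, ?_, ?_, ?_, ?_⟩
      · rw [hkeys]; exact h.1
      · intro y hy
        rw [hkeys] at hy
        by_cases hyx : y = x
        · subst hyx
          exact ⟨ρ y, PySem.Dict.get?_insert_self _ _ _, hkeys ▸ (e2 ▸ (hq.2.2.1 y (e2 ▸ hy)).1 : ρ y ∈ parent.keys),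
            (h.2.2.1 y hy).2.2, fun h' => h', hdlt⟩
        · obtain ⟨p', hp', hpk', hρ', hroot', hd'⟩ := hq.2.1 y (e2 ▸ hy)
          refine ⟨p', ?_, hkeys ▸ (e2 ▸ hpk' : p' ∈ parent.keys), hρ', hroot', hd'⟩
          rw [PySem.Dict.get?_insert_of_ne _ _ hyx]; exact hp' 
      · intro y hy
        rw [hkeys] at hy
        obtain ⟨hm, hg, hρρ⟩ := hq.2.2.1 y (e2 ▸ hy)
        refine ⟨hkeys ▸ (e2 ▸ hm : ρ y ∈ parent.keys), ?_, hρρ⟩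
        by_cases hρyx : ρ y = x
        · have hxx : ρ x = x := by rw [← hρyx]; exact hρρ
          rw [hρyx, PySem.Dict.get?_insert_self _ _ _, hxx]
        · rw [PySem.Dict.get?_insert_of_ne _ _ hρyx, hg]
      · intro y hy
        rw [hkeys] at hy
        exact h.2.2.2 y hy

theorem ufAttach {parent ρ d B} (h : UFInv parent ρ d B) {u v : String}
    (hu : u ∈ parent.keys) (hv : v ∈ parent.keys)
    (hru : ρ u = u) (hrv : ρ v = v) (huv : u ≠ v) :
    (parent.insert u v).keys = parent.keys ∧
    UFInv (parent.insert u v) (fun x => if ρ x = u then v else ρ x)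
      (fun x => if ρ x = u then d x + 1 + B else d x) (2*B+1) := by
  obtain ⟨h1, h2, h3, h4⟩ := h
  have hcu : parent.contains u = true := (PySem.Dict.contains_iff_mem_keys _ _).mpr hu
  have hkeys : (parent.insert u v).keys = parent.keys := PySem.Dict.keys_insert_of_contains _ _ hcu
  have hvu : ρ v ≠ u := by rw [hrv]; exact fun hc => huv hc.symm
  have hvu' : v ≠ u := fun hc => huv hc.symm
  refine ⟨hkeys, ?_, ?_, ?_, ?_⟩
  · rw [hkeys]; exact h1
  · intro y hy; rw [hkeys] at hy
    by_cases hyu : y = u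
    · refine ⟨v, by rw [hyu]; exact PySem.Dict.get?_insert_self _ _ _, hkeys ▸ hv, ?_, ?_, ?_⟩
      · beta_reduce; rw [hyu, if_neg hvu, if_pos hru, hrv]
      · intro hvy; exact absurd (hvy.trans hyu) (fun hc => huv hc.symm)
      · intro _
        beta_reduce; rw [hyu, if_neg hvu, if_pos hru]
        have := h4 v hv; omega
    · obtain ⟨p, hp, hpk, hρ, hroot, hd⟩ := h2 y hy
      refine ⟨p, by rw [PySem.Dict.get?_insert_of_ne _ _ hyu]; exact hp, hkeys ▸ hpk,
        by simp only [hρ], ?_, ?_⟩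
      · intro hpy
        have hry := hroot hpy
        have hyu' : ρ y ≠ u := by rw [hry]; exact hyu
        beta_reduce; rw [if_neg hyu', hry]
      · intro hpy
        have := hd hpy
        by_cases hc : ρ y = u
        · simp only [hρ, if_pos hc]; omega
        · simp only [hρ, if_neg hc]; omega
  · intro y hy; rw [hkeys] at hy
    obtain ⟨hm, hg, hρρ⟩ := h3 y hy
    by_cases hc : ρ y = u
    · beta_reduce; rw [if_pos hc, if_neg hvu, hrv]
      refine ⟨hkeys ▸ hv, ?_, rfl⟩
      rw [PySem.Dict.get?_insert_of_ne _ _ (fun hx => huv hx.symm)]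
      have := (h3 v hv).2.1
      rwa [hrv] at this
    · simp only [if_neg hc]
      refine ⟨hkeys ▸ hm, ?_, ?_⟩
      · rw [PySem.Dict.get?_insert_of_ne _ _ hc]; exact hg
      · beta_reduce; rw [hρρ, if_neg hc]
  · intro y hy; rw [hkeys] at hy
    have := h4 y hy
    by_cases hc : ρ y = u
    · simp only [if_pos hc]; omega
    · simp only [if_neg hc]; omega

theorem merge_iff (f : String → String) {u v : String} (huv : u ≠ v) (x y : String) :
    ((if f x = u then v else f x) = (if f y = u then v else f y)) ↔
      (f x = f y ∨ (f x = u ∧ f y = v) ∨ (f x = v ∧ f y = u)) := by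
  by_cases hx : f x = u <;> by_cases hy : f y = u <;>
    simp [hx, hy, huv, eq_comm] <;> tauto

theorem ufUnion_correct {parent ρ d B} (fuel : Nat) (rank : PySem.Dict String Int)
    (h : UFInv parent ρ d B) {l r : String}
    (hl : l ∈ parent.keys) (hr : r ∈ parent.keys) (hf : B < fuel) :
    (ufUnion fuel parent rank l r).1.keys = parent.keys ∧
    ∃ ρ' d', UFInv (ufUnion fuel parent rank l r).1 ρ' d' (2*B+1) ∧
      ∀ x y, (ρ' x = ρ' y ↔ (ρ x = ρ y ∨ (ρ x = ρ l ∧ ρ y = ρ r) ∨ (ρ x = ρ r ∧ ρ y = ρ l))) := by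
  have hBl := h.2.2.2 l hl
  obtain ⟨e1a, e1b, h1⟩ := ufFind_correct fuel l h hl (by omega)
  have hBr := h.2.2.2 r hr
  obtain ⟨e2a, e2b, h2⟩ := ufFind_correct fuel r h1 (e1b ▸ hr) (by omega)
  have hkeys2 : (ufFind fuel (ufFind fuel parent l).2 r).2.keys = parent.keys := e2b.trans e1b
  have hml : ρ l ∈ parent.keys := (h.2.2.1 l hl).1
  have hmr : ρ r ∈ parent.keys := (h.2.2.1 r hr).1
  have hρl : ρ (ρ l) = ρ l := (h.2.2.1 l hl).2.2
  have hρr : ρ (ρ r) = ρ r := (h.2.2.1 r hr).2.2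
  simp only [ufUnion, e1a, e2a]
  by_cases hlr : ρ l = ρ r
  · rw [if_neg (fun hc => hc hlr)]
    refine ⟨hkeys2, ρ, d, ufInv_mono h2 (by omega), ?_⟩
    intro x y
    constructor
    · intro hxy; exact Or.inl hxy
    · rintro (hxy | ⟨ha, hb⟩ | ⟨ha, hb⟩)
      · exact hxy
      · rw [ha, hb, hlr]
      · rw [ha, hb, hlr]
  · rw [if_pos hlr]
    have hlr' : ρ r ≠ ρ l := fun hc => hlr hc.symm
    split_ifs with hr1 hr2
    · obtain ⟨hk, hinv⟩ := ufAttach h2 (hkeys2 ▸ hmr) (hkeys2 ▸ hml) hρr hρl hlr'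
      exact ⟨hk.trans hkeys2, _, _, hinv, fun x y => by rw [merge_iff ρ hlr' x y]; tauto⟩
    · obtain ⟨hk, hinv⟩ := ufAttach h2 (hkeys2 ▸ hml) (hkeys2 ▸ hmr) hρl hρr hlr
      exact ⟨hk.trans hkeys2, _, _, hinv, fun x y => by rw [merge_iff ρ hlr x y]⟩
    · obtain ⟨hk, hinv⟩ := ufAttach h2 (hkeys2 ▸ hmr) (hkeys2 ▸ hml) hρr hρl hlr'
      exact ⟨hk.trans hkeys2, _, _, hinv, fun x y => by rw [merge_iff ρ hlr' x y]; tauto⟩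

theorem relabel_fold (m : List String) (comp : PySem.Dict String String) (α : String)
    (hm : ∀ x ∈ m, x ∈ comp.keys) :
    (m.foldl (fun c city => c.insert city α) comp).keys = comp.keys ∧
    ∀ x, cD (m.foldl (fun c city => c.insert city α) comp) x = if x ∈ m then α else cD comp x := by
  induction m generalizing comp with
  | nil => simp [cD]
  | cons c m' ih =>
    have hc : comp.contains c = true :=
      (PySem.Dict.contains_iff_mem_keys _ _).mpr (hm c List.mem_cons_self)
    have hk1 : (comp.insert c α).keys = comp.keys := PySem.Dict.keys_insert_of_contains _ _ hc
    obtain ⟨hk, hcd⟩ := ih (comp.insert c α)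
      (fun x hx => hk1 ▸ hm x (List.mem_cons_of_mem _ hx))
    refine ⟨by simp only [List.foldl_cons]; rw [hk, hk1], ?_⟩
    intro x
    simp only [List.foldl_cons]
    rw [hcd x]
    by_cases hx : x ∈ m'
    · simp [hx]
    · by_cases hxc : x = c
      · subst hxc
        simp [cD, PySem.Dict.getD_insert_self]
      · simp only [cD, if_neg hx]
        rw [PySem.Dict.getD_insert]
        simp [hxc, List.mem_cons, hx]

theorem cm_relabel {K : List String} {comp : PySem.Dict String String}
    {members : PySem.Dict String (List String)} (h : CMInv K comp members)
    (α β : String) (hαβ : α ≠ β) :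
    (CMInv K ((members.getD β []).foldl (fun c city => c.insert city α) comp)
      ((members.insert α (members.getD α [] ++ members.getD β [])).erase β)) ∧
    (∀ x ∈ K, cD ((members.getD β []).foldl (fun c city => c.insert city α) comp) x =
      if cD comp x = β then α else cD comp x) := by
  obtain ⟨hck, hM1, hM2⟩ := h
  obtain ⟨hfk, hfc⟩ := relabel_fold (members.getD β []) comp α
    (fun x hx => by rw [hck]; exact (hM1 β x hx).1)
  have hmem : ∀ x ∈ K, (x ∈ members.getD β [] ↔ cD comp x = β) := by
    intro x hxK
    constructor
    · intro hx; exact (hM1 β x hx).2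
    · intro hc; have := hM2 x hxK; rwa [hc] at this
  have hcd' : ∀ x ∈ K, cD ((members.getD β []).foldl (fun c city => c.insert city α) comp) x =
      if cD comp x = β then α else cD comp x := by
    intro x hxK
    rw [hfc x]
    by_cases hc : cD comp x = β
    · rw [if_pos ((hmem x hxK).mpr hc), if_pos hc]
    · rw [if_neg (fun hx => hc ((hmem x hxK).mp hx)), if_neg hc]
  have hget : ∀ lab, ((members.insert α (members.getD α [] ++ members.getD β [])).erase β).getD lab [] =
      if lab = β then [] else if lab = α then members.getD α [] ++ members.getD β [] else members.getD lab [] := by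
    intro lab
    rw [PySem.Dict.getD_eq_get?_getD, dict_get?_erase]
    by_cases h1 : lab = β
    · simp [h1]
    · rw [if_neg h1, if_neg h1, PySem.Dict.get?_insert]
      by_cases h2 : lab = α
      · simp [h2]
      · rw [if_neg h2, if_neg h2, PySem.Dict.getD_eq_get?_getD]
  refine ⟨⟨hfk.trans hck, ?_, ?_⟩, hcd'⟩
  · intro lab x hx
    rw [hget lab] at hx
    by_cases h1 : lab = β
    · rw [if_pos h1] at hx; exact absurd hx (List.not_mem_nil)
    · rw [if_neg h1] at hx
      by_cases h2 : lab = α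
      · rw [if_pos h2] at hx
        rcases List.mem_append.mp hx with hx' | hx'
        · have := hM1 α x hx'
          refine ⟨this.1, ?_⟩
          rw [hcd' x this.1, if_neg (by rw [this.2]; exact hαβ), this.2, h2]
        · have h3 := hM1 β x hx'
          refine ⟨h3.1, ?_⟩
          rw [hcd' x h3.1, if_pos h3.2, h2]
      · rw [if_neg h2] at hx
        have := hM1 lab x hx
        refine ⟨this.1, ?_⟩
        rw [hcd' x this.1, if_neg (by rw [this.2]; exact h1), this.2]
  · intro x hxK
    rw [hcd' x hxK]
    by_cases hc : cD comp x = β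
    · rw [if_pos hc, hget α, if_neg hαβ, if_pos rfl]
      exact List.mem_append.mpr (Or.inr ((hmem x hxK).mpr hc))
    · rw [if_neg hc, hget (cD comp x), if_neg hc]
      by_cases h2 : cD comp x = α
      · rw [if_pos h2]
        refine List.mem_append.mpr (Or.inl ?_)
        have := hM2 x hxK; rwa [h2] at this
      · rw [if_neg h2]
        exact hM2 x hxK

theorem cmMerge_correct {K comp members} (h : CMInv K comp members) {l r : String}
    (hl : l ∈ K) (hr : r ∈ K) :
    CMInv K (cmMerge comp members l r).1 (cmMerge comp members l r).2 ∧
    ∀ x ∈ K, ∀ y ∈ K,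
      (cD (cmMerge comp members l r).1 x = cD (cmMerge comp members l r).1 y ↔
        (cD comp x = cD comp y ∨ (cD comp x = cD comp l ∧ cD comp y = cD comp r) ∨
          (cD comp x = cD comp r ∧ cD comp y = cD comp l))) := by
  simp only [cmMerge, cD]
  split_ifs with hab hsw
  · -- swap branch: relabel the a-class (β := comp[l]) to b (α := comp[r])
    obtain ⟨hinv, hcd⟩ := cm_relabel ⟨h.1, h.2.1, h.2.2⟩ (comp.getD r r) (comp.getD l l)
      (fun hc => hab hc.symm)
    simp only [cD] at hinv hcd
    refine ⟨hinv, ?_⟩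
    intro x hx y hy
    rw [hcd x hx, hcd y hy, merge_iff (fun z => comp.getD z z) hab x y]
  · -- no swap: relabel the b-class (β := comp[r]) to a (α := comp[l])
    obtain ⟨hinv, hcd⟩ := cm_relabel ⟨h.1, h.2.1, h.2.2⟩ (comp.getD l l) (comp.getD r r) hab
    simp only [cD] at hinv hcd
    refine ⟨hinv, ?_⟩
    intro x hx y hy
    rw [hcd x hx, hcd y hy, merge_iff (fun z => comp.getD z z) (fun hc => hab hc.symm) x y]
    tauto
  · rw [not_ne_iff] at hab
    refine ⟨h, ?_⟩
    intro x hx y hy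
    constructor
    · intro hxy; exact Or.inl hxy
    · rintro (hxy | ⟨ha, hb⟩ | ⟨ha, hb⟩)
      · exact hxy
      · rw [ha, hb, hab]
      · rw [ha, hb, hab]

theorem advance_correct {parent comp members ρ d B} (fuel : Nat) (fdate : Int)
    (rank : PySem.Dict String Int) (ts : List (Int × String × String))
    (h : Corr parent comp members ρ d B)
    (hts : ∀ t ∈ ts, t.2.1 ∈ parent.keys ∧ t.2.2 ∈ parent.keys)
    (hf : 2 ^ ts.length * (B + 1) ≤ fuel) :
    (ufAdvance fuel fdate ts parent rank).1 = (cmAdvance fdate ts comp members).1 ∧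
    (ufAdvance fuel fdate ts parent rank).2.1.keys = parent.keys ∧
    ∃ ρ' d' B', Corr (ufAdvance fuel fdate ts parent rank).2.1
        (cmAdvance fdate ts comp members).2.1 (cmAdvance fdate ts comp members).2.2 ρ' d' B' ∧
      (∀ t ∈ (ufAdvance fuel fdate ts parent rank).1, t.2.1 ∈ parent.keys ∧ t.2.2 ∈ parent.keys) ∧
      2 ^ (ufAdvance fuel fdate ts parent rank).1.length * (B' + 1) ≤ fuel := by
  induction ts generalizing parent rank comp members ρ d B with
  | nil =>
    exact ⟨rfl, rfl, ρ, d, B, h, fun t ht => absurd ht List.not_mem_nil, hf⟩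
  | cons t ts ih =>
    simp only [ufAdvance, cmAdvance]
    by_cases hdt : t.1 ≤ fdate
    · rw [if_pos hdt, if_pos hdt]
      obtain ⟨hinvA, hcm, hcorr⟩ := h
      have hl := (hts t List.mem_cons_self).1
      have hr := (hts t List.mem_cons_self).2
      have h2p : 1 ≤ 2 ^ ts.length := Nat.one_le_two_pow
      rw [List.length_cons, pow_succ] at hf
      have hBfuel : B < fuel := by
        have hx : 2 * (B + 1) ≤ 2 ^ ts.length * 2 * (B + 1) :=
          Nat.mul_le_mul_right (B + 1) (by omega)
        omega
      obtain ⟨hkU, ρ', d', hinvA', hiff⟩ := ufUnion_correct fuel rank hinvA hl hr hBfuel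
      obtain ⟨hcm', hiffB⟩ := cmMerge_correct hcm hl hr
      have hcorr' : Corr (ufUnion fuel parent rank t.2.1 t.2.2).1
          (cmMerge comp members t.2.1 t.2.2).1 (cmMerge comp members t.2.1 t.2.2).2 ρ' d' (2*B+1) := by
        refine ⟨hinvA', by rw [hkU]; exact hcm', ?_⟩
        intro x hx y hy
        rw [hkU] at hx hy
        rw [hiffB x hx y hy, hiff x y,
          hcorr x hx y hy, hcorr x hx t.2.1 hl, hcorr y hy t.2.2 hr,
          hcorr x hx t.2.2 hr, hcorr y hy t.2.1 hl]
      have hts' : ∀ t' ∈ ts, t'.2.1 ∈ (ufUnion fuel parent rank t.2.1 t.2.2).1.keys ∧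
          t'.2.2 ∈ (ufUnion fuel parent rank t.2.1 t.2.2).1.keys := by
        intro t' ht'
        rw [hkU]
        exact hts t' (List.mem_cons_of_mem _ ht')
      have hf' : 2 ^ ts.length * (2*B+1 + 1) ≤ fuel := by
        calc 2 ^ ts.length * (2*B+1+1) = 2 ^ ts.length * 2 * (B+1) := by ring
        _ ≤ fuel := hf
      obtain ⟨e1, e2, ρ'', d'', B'', hc'', hmem'', hf''⟩ := ih _ hcorr' hts' hf'
      refine ⟨e1, e2.trans hkU, ρ'', d'', B'', hc'', ?_, hf''⟩
      intro t' ht'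
      have := hmem'' t' ht'
      rwa [hkU] at this
    · rw [if_neg hdt, if_neg hdt]
      exact ⟨rfl, rfl, ρ, d, B, h, hts, hf⟩

theorem loop_correct {parent comp members ρ d B} (fuel : Nat)
    (fs : List (String × Int × String × String)) (ts : List (Int × String × String))
    (rank : PySem.Dict String Int)
    (h : Corr parent comp members ρ d B)
    (hfs : ∀ f ∈ fs, f.2.2.1 ∈ parent.keys ∧ f.2.2.2 ∈ parent.keys)
    (hts : ∀ t ∈ ts, t.2.1 ∈ parent.keys ∧ t.2.2 ∈ parent.keys)
    (hf : 2 ^ ts.length * (B + 1) ≤ fuel) :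
    ufLoop fuel fs ts parent rank = cmLoop fs ts comp members := by
  induction fs generalizing ts parent rank comp members ρ d B with
  | nil => simp [ufLoop, cmLoop]
  | cons f fs ih =>
    simp only [ufLoop, cmLoop]
    obtain ⟨e1, ekeys, ρ', d', B', hc', hmem', hf'⟩ := advance_correct fuel f.2.1 rank ts h hts hf
    obtain ⟨hAinv, hcm', hcorr'⟩ := hc'
    have hB'fuel : B' < fuel := by
      have h2p : 1 ≤ 2 ^ (ufAdvance fuel f.2.1 ts parent rank).1.length := Nat.one_le_two_pow
      have hx : 1 * (B' + 1) ≤ 2 ^ (ufAdvance fuel f.2.1 ts parent rank).1.length * (B' + 1) :=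
        Nat.mul_le_mul_right (B' + 1) h2p
      omega
    have hdep : f.2.2.1 ∈ (ufAdvance fuel f.2.1 ts parent rank).2.1.keys :=
      ekeys ▸ (hfs f List.mem_cons_self).1
    have harr : f.2.2.2 ∈ (ufAdvance fuel f.2.1 ts parent rank).2.1.keys :=
      ekeys ▸ (hfs f List.mem_cons_self).2
    obtain ⟨ed1, ed2, hinv2⟩ := ufFind_correct fuel f.2.2.1 hAinv hdep
      (lt_of_le_of_lt (hAinv.2.2.2 _ hdep) hB'fuel)
    obtain ⟨ea1, ea2, hinv3⟩ := ufFind_correct fuel f.2.2.2 hinv2 (ed2 ▸ harr)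
      (lt_of_le_of_lt (hinv2.2.2.2 _ (ed2 ▸ harr)) hB'fuel)
    have hcond : ((ufFind fuel (ufAdvance fuel f.2.1 ts parent rank).2.1 f.2.2.1).1 =
        (ufFind fuel (ufFind fuel (ufAdvance fuel f.2.1 ts parent rank).2.1 f.2.2.1).2 f.2.2.2).1) ↔
        (cD (cmAdvance f.2.1 ts comp members).2.1 f.2.2.1 =
         cD (cmAdvance f.2.1 ts comp members).2.1 f.2.2.2) := by
      rw [ed1, ea1]
      exact (hcorr' f.2.2.1 hdep f.2.2.2 harr).symm
    have hkeys3 : (ufFind fuel (ufFind fuel (ufAdvance fuel f.2.1 ts parent rank).2.1 f.2.2.1).2 f.2.2.2).2.keys =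
        (ufAdvance fuel f.2.1 ts parent rank).2.1.keys := ea2.trans ed2
    have hrec : ufLoop fuel fs (ufAdvance fuel f.2.1 ts parent rank).1
        (ufFind fuel (ufFind fuel (ufAdvance fuel f.2.1 ts parent rank).2.1 f.2.2.1).2 f.2.2.2).2
        (ufAdvance fuel f.2.1 ts parent rank).2.2 =
        cmLoop fs (cmAdvance f.2.1 ts comp members).1 (cmAdvance f.2.1 ts comp members).2.1
          (cmAdvance f.2.1 ts comp members).2.2 := by
      rw [← e1]
      refine ih _ _ (ρ := ρ') (d := d') (B := B') ⟨hinv3, by rw [hkeys3]; exact hcm', ?_⟩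
        (fun f' hf'' => ?_) (fun t' ht' => ?_) ?_
      · intro x hx y hy
        rw [hkeys3] at hx hy
        exact hcorr' x hx y hy
      · refine ⟨?_, ?_⟩ <;> rw [hkeys3, ekeys]
        · exact (hfs f' (List.mem_cons_of_mem _ hf'')).1
        · exact (hfs f' (List.mem_cons_of_mem _ hf'')).2
      · refine ⟨?_, ?_⟩ <;> rw [hkeys3, ekeys]
        · exact (hmem' t' ht').1
        · exact (hmem' t' ht').2
      · exact hf'
    by_cases hcc : cD (cmAdvance f.2.1 ts comp members).2.1 f.2.2.1 =
        cD (cmAdvance f.2.1 ts comp members).2.1 f.2.2.2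
    · rw [if_pos (hcond.mpr hcc), if_pos (show (cmAdvance f.2.1 ts comp members).2.1.getD f.2.2.1 f.2.2.1 = (cmAdvance f.2.1 ts comp members).2.1.getD f.2.2.2 f.2.2.2 from hcc), hrec]
    · rw [if_neg (fun hc => hcc (hcond.mp hc)), if_neg (show ¬ ((cmAdvance f.2.1 ts comp members).2.1.getD f.2.2.1 f.2.2.1 = (cmAdvance f.2.1 ts comp members).2.1.getD f.2.2.2 f.2.2.2) from hcc), hrec]

-- invariant of the two (parallel) seeding folds
def SeedInv (parent comp : PySem.Dict String String)
    (members : PySem.Dict String (List String)) (C : List String) : Prop :=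
  parent.keys.Nodup ∧ comp.keys = parent.keys ∧
  (∀ x, x ∈ parent.keys ↔ x ∈ C) ∧
  (∀ x ∈ parent.keys, parent.get? x = some x ∧ comp.get? x = some x) ∧
  (∀ lab, members.get? lab = (if lab ∈ parent.keys then some [lab] else none))

theorem seed_one {parent rank comp members C} (c : String)
    (h : SeedInv parent comp members C) :
    SeedInv (ufAdd (parent, rank) c).1 (cmSeed (comp, members) c).1
      (cmSeed (comp, members) c).2 (C ++ [c]) := by
  obtain ⟨h1, h2, h3, h4, h5⟩ := h
  by_cases hc : c ∈ parent.keys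
  · have hpc : parent.contains c = true := (PySem.Dict.contains_iff_mem_keys _ _).mpr hc
    have hcc : comp.contains c = true := (PySem.Dict.contains_iff_mem_keys _ _).mpr (h2 ▸ hc)
    simp only [ufAdd, cmSeed, hpc, hcc, if_true]
    refine ⟨h1, h2, ?_, h4, h5⟩
    intro x
    rw [h3 x]
    simp only [List.mem_append, List.mem_singleton]
    constructor
    · exact Or.inl
    · rintro (hx | rfl)
      · exact hx
      · exact (h3 x).mp hc
  · have hpc : parent.contains c = false :=
      Bool.eq_false_iff.mpr (fun hx => hc ((PySem.Dict.contains_iff_mem_keys _ _).mp hx))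
    have hcc : comp.contains c = false :=
      Bool.eq_false_iff.mpr (fun hx => hc (h2 ▸ (PySem.Dict.contains_iff_mem_keys _ _).mp hx))
    simp only [ufAdd, cmSeed, hpc, hcc, Bool.false_eq_true, if_false]
    have hK : (parent.insert c c).keys = parent.keys ++ [c] :=
      PySem.Dict.keys_insert_of_not_contains _ _ hpc
    have hKc : (comp.insert c c).keys = comp.keys ++ [c] :=
      PySem.Dict.keys_insert_of_not_contains _ _ hcc
    refine ⟨?_, ?_, ?_, ?_, ?_⟩
    · rw [hK]
      exact h1.append (List.nodup_singleton c)
        (fun a ha hb => hc ((List.mem_singleton.mp hb) ▸ ha))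
    · rw [hKc, hK, h2]
    · intro x
      rw [hK]
      simp only [List.mem_append, List.mem_singleton, h3 x]
    · intro x hx
      rw [hK] at hx
      rcases List.mem_append.mp hx with hx' | hx'
      · have hxc : x ≠ c := fun he => hc (he ▸ hx')
        rw [PySem.Dict.get?_insert_of_ne _ _ hxc, PySem.Dict.get?_insert_of_ne _ _ hxc]
        exact h4 x hx'
      · rw [List.mem_singleton.mp hx']
        exact ⟨PySem.Dict.get?_insert_self _ _ _, PySem.Dict.get?_insert_self _ _ _⟩
    · intro lab
      rw [PySem.Dict.get?_insert, hK]
      by_cases hlc : lab = c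
      · rw [hlc, if_pos rfl, if_pos (by simp)]
      · rw [if_neg hlc, h5 lab]
        by_cases hlk : lab ∈ parent.keys
        · rw [if_pos hlk, if_pos (by simp [hlk])]
        · rw [if_neg hlk, if_neg (by simp [hlk, hlc])]

theorem seed_all (trains : List (Int × String × String)) :
    ∀ {parent rank comp members C}, SeedInv parent comp members C →
    SeedInv (trains.foldl (fun pr t => ufAdd (ufAdd pr t.2.1) t.2.2) (parent, rank)).1
      (trains.foldl (fun cm t => cmSeed (cmSeed cm t.2.1) t.2.2) (comp, members)).1
      (trains.foldl (fun cm t => cmSeed (cmSeed cm t.2.1) t.2.2) (comp, members)).2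
      (C ++ trainCities trains) := by
  induction trains with
  | nil =>
    intro parent rank comp members C h
    simpa [trainCities] using h
  | cons t ts ih =>
    intro parent rank comp members C h
    simp only [List.foldl_cons]
    have h2 := seed_one (rank := (ufAdd (parent, rank) t.2.1).2) t.2.2
      (seed_one (rank := rank) t.2.1 h)
    have h3 := ih (rank := (ufAdd (ufAdd (parent, rank) t.2.1) t.2.2).2) h2
    simpa [trainCities, List.append_assoc] using h3

theorem seed_corr {parent comp members C} (h : SeedInv parent comp members C) :
    Corr parent comp members (fun x => x) (fun _ => 0) 0 := by
  obtain ⟨h1, h2, h3, h4, h5⟩ := h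
  have hcd : ∀ x ∈ parent.keys, cD comp x = x := by
    intro x hx
    unfold cD
    rw [PySem.Dict.getD_eq_get?_getD, (h4 x hx).2]
    rfl
  refine ⟨⟨h1, ?_, ?_, fun x _ => le_refl 0⟩, ⟨h2, ?_, ?_⟩, ?_⟩
  · intro x hx
    exact ⟨x, (h4 x hx).1, hx, rfl, fun _ => rfl, fun hne => absurd rfl hne⟩
  · intro x hx
    exact ⟨hx, (h4 x hx).1, rfl⟩
  · intro lab x hx
    rw [PySem.Dict.getD_eq_get?_getD, h5 lab] at hx
    by_cases hl : lab ∈ parent.keys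
    · rw [if_pos hl] at hx
      simp only [Option.getD_some, List.mem_singleton] at hx
      rw [hx]
      exact ⟨hl, hcd lab hl⟩
    · rw [if_neg hl] at hx
      exact absurd hx List.not_mem_nil
  · intro x hx
    rw [hcd x hx, PySem.Dict.getD_eq_get?_getD, h5 x, if_pos hx]
    simp
  · intro x hx y hy
    show cD comp x = cD comp y ↔ x = y
    rw [hcd x hx, hcd y hy]

-- ===== VERDICT (by name: the statement is the Claim_ definition above) =====
theorem trains_planes_spec : Claim_equal_trains_planes := by
  unfold Claim_equal_trains_planes
  intro trains planes _hdom hpre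
  unfold Spec_trains_planes
  have hempty : SeedInv (PySem.Dict.empty) (PySem.Dict.empty) (PySem.Dict.empty) [] := by
    refine ⟨?_, rfl, ?_, ?_, ?_⟩ <;> simp [PySem.Dict.keys_empty, PySem.Dict.get?_empty]
  have hseed := seed_all trains (rank := PySem.Dict.empty) hempty
  rw [List.nil_append] at hseed
  have hcorr := seed_corr hseed
  show ufLoop (2 ^ trains.length) (PySem.List.sorted planes (fun x => x.2.1) false)
      (PySem.List.sorted trains (fun x => x.1) false)
      (trains.foldl (fun pr t => ufAdd (ufAdd pr t.2.1) t.2.2)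
        ((PySem.Dict.empty : PySem.Dict String String), (PySem.Dict.empty : PySem.Dict String Int))).1
      (trains.foldl (fun pr t => ufAdd (ufAdd pr t.2.1) t.2.2)
        ((PySem.Dict.empty : PySem.Dict String String), (PySem.Dict.empty : PySem.Dict String Int))).2 =
    cmLoop (PySem.List.sorted planes (fun x => x.2.1) false)
      (PySem.List.sorted trains (fun x => x.1) false)
      (trains.foldl (fun cm t => cmSeed (cmSeed cm t.2.1) t.2.2)
        ((PySem.Dict.empty : PySem.Dict String String), (PySem.Dict.empty : PySem.Dict String (List String)))).1
      (trains.foldl (fun cm t => cmSeed (cmSeed cm t.2.1) t.2.2)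
        ((PySem.Dict.empty : PySem.Dict String String), (PySem.Dict.empty : PySem.Dict String (List String)))).2
  apply loop_correct _ _ _ _ hcorr
  · intro f hf
    have hfp := (PySem.List.mem_sorted _ _ _ _).mp hf
    obtain ⟨hd, ha⟩ := hpre f hfp
    exact ⟨(hseed.2.2.1 _).mpr hd, (hseed.2.2.1 _).mpr ha⟩
  · intro t ht
    have htp := (PySem.List.mem_sorted _ _ _ _).mp ht
    constructor
    · exact (hseed.2.2.1 _).mpr (List.mem_flatMap.mpr ⟨t, htp, by simp⟩)
    · exact (hseed.2.2.1 _).mpr (List.mem_flatMap.mpr ⟨t, htp, by simp⟩)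
  · rw [PySem.List.length_sorted]
    simp
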